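-- pv_equiv track=rewrite | github.com/miguelclsouto/FEUP-L.EIC | Fundamentos da Programação/QPs/QP4/exercise2.py | adigits
-- ===== SOURCE A (Python) =====
-- def adigits(a, b, c):
--
--     n = [a, b, c]
--     min = 9
--     num = 0
--     s = len(n)
--
--     while s != 0:
--
--         min = 0
--
--         for i in range(1, s):
--
--             if n[min] > n[i]:
--
--                 min = i
--
--         num = num * 10 + n[min]
--
--         n.remove(n[min])
--
--         s = len(n)
--
--     return num
-- ===== SOURCE B (Python) =====
-- def adigits(a, b, c):
--     s = sorted([a, b, c])
--     return 100 * s[0] + 10 * s[1] + s[2]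
-- ===== Notes on version B (the rewrite author's own statement) =====
-- stated objective: simpler
-- what changed: replaces the explicit selection-sort-with-removal loop that folds num = num*10 + digit by one sorted() call and the loop-free closed form 100*s[0] + 10*s[1] + s[2]
import Mathlib
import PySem

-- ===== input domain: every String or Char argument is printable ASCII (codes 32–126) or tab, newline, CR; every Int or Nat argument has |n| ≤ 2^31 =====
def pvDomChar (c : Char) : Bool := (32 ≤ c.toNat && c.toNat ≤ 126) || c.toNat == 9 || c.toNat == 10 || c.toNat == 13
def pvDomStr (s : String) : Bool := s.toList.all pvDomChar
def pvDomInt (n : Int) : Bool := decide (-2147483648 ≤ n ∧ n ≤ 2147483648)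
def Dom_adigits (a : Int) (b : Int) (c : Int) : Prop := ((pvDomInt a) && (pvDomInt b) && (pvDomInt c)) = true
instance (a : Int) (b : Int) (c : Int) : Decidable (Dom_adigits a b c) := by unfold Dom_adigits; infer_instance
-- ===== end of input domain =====

-- B replaces A's selection-sort-with-removal fold by one sorted() call and the
-- loop-free closed form 100*s[0] + 10*s[1] + s[2] (objective: simpler).

-- ===== PORT A =====
-- the inner 'for i in range(1, s)' scan for the index of the minimum
-- (indices produced by pyRange are always in range, so the .getD 0 default is never used)
def adigitsFindMin (n : List Int) (s : Int) : Int :=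
  (PySem.List.pyRange 1 s 1).foldl
    (fun mn i =>
      if (PySem.List.pyGet? n mn).getD 0 > (PySem.List.pyGet? n i).getD 0 then i else mn) 0

-- the 'while s != 0' loop: append min digit to num, n.remove(n[min]), recurse
def adigitsLoop (n : List Int) (num : Int) : Int :=
  if n = [] then num
  else
    let mn := adigitsFindMin n n.length
    let v := (PySem.List.pyGet? n mn).getD 0
    match h2 : PySem.List.remove? n v with
    | some n' => adigitsLoop n' (num * 10 + v)
    | none => num * 10 + v   -- unreachable: n[min] is an element of n
termination_by n.length
decreasing_by
  have hv : v ∈ n := by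
    by_contra hv
    simp [(PySem.List.remove?_eq_none_iff n v).mpr hv] at h2
  have h3 := PySem.List.remove?_eq_some_erase n v hv
  rw [h2] at h3
  cases h3
  calc (n.erase v).length < (n.erase v).length + 1 := Nat.lt_succ_self _
    _ = n.length := List.length_erase_add_one hv

def adigits (a : Int) (b : Int) (c : Int) : Int :=
  adigitsLoop [a, b, c] 0

-- ===== PORT B =====
def adigits_alt (a : Int) (b : Int) (c : Int) : Int :=
  match PySem.List.sorted [a, b, c] (fun x => x) false with
  | [x, y, z] => 100 * x + 10 * y + z
  | _ => 0   -- unreachable: sorted keeps the three elements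

-- ===== PRECONDITION & SPEC =====
def Spec_adigits (a : Int) (b : Int) (c : Int) (out : Int) : Prop := out = adigits_alt a b c
instance (a : Int) (b : Int) (c : Int) (out : Int) : Decidable (Spec_adigits a b c out) := by unfold Spec_adigits; infer_instance

-- ===== CLAIM (what is proved, stated in full; the proofs are below) =====
def Claim_equal_adigits : Prop := ∀ (a : Int) (b : Int) (c : Int), Dom_adigits a b c → Spec_adigits a b c (adigits a b c)

-- ===== LEMMAS AND PROOFS =====
theorem loop0 (num : Int) : adigitsLoop [] num = num := by
  rw [adigitsLoop]; simp

theorem loop1 (x num : Int) : adigitsLoop [x] num = num * 10 + x := by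
  rw [adigitsLoop]
  simp [adigitsFindMin, PySem.List.pyRange, PySem.List.pyGet?, PySem.List.pyIdx?]
  split <;> rename_i h2 <;> simp_all [loop0]

theorem loop2_le (x y num : Int) (h : x ≤ y) :
    adigitsLoop [x, y] num = adigitsLoop [y] (num * 10 + x) := by
  rw [adigitsLoop]
  have h1 : ¬ y < x := not_lt.mpr h
  simp [adigitsFindMin, List.range_succ, PySem.List.pyRange, PySem.List.pyGet?, PySem.List.pyIdx?, h1]
  split <;> rename_i h2 <;> simp [h1] at h2; (subst h2; rfl)

theorem loop2_lt (x y num : Int) (h : y < x) :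
    adigitsLoop [x, y] num = adigitsLoop [x] (num * 10 + y) := by
  rw [adigitsLoop]
  have hne : x ≠ y := ne_of_gt h
  simp [adigitsFindMin, List.range_succ, PySem.List.pyRange, PySem.List.pyGet?, PySem.List.pyIdx?, h]
  split <;> rename_i h2 <;> simp [h, PySem.List.remove?_cons_of_ne, hne] at h2; (subst h2; rfl)

theorem loop3_x (x y z num : Int) (h1 : x ≤ y) (h2 : x ≤ z) :
    adigitsLoop [x, y, z] num = adigitsLoop [y, z] (num * 10 + x) := by
  rw [adigitsLoop]
  have g1 : ¬ y < x := not_lt.mpr h1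
  have g2 : ¬ z < x := not_lt.mpr h2
  simp [adigitsFindMin, List.range_succ, PySem.List.pyRange, PySem.List.pyGet?, PySem.List.pyIdx?, g1, g2]
  split <;> rename_i hr <;> simp [List.range_succ, g1, g2] at hr; (subst hr; rfl)

theorem loop3_y (x y z num : Int) (h1 : y < x) (h2 : y ≤ z) :
    adigitsLoop [x, y, z] num = adigitsLoop [x, z] (num * 10 + y) := by
  rw [adigitsLoop]
  have g2 : ¬ z < y := not_lt.mpr h2
  have g3 : x ≠ y := ne_of_gt h1
  simp [adigitsFindMin, List.range_succ, PySem.List.pyRange, PySem.List.pyGet?, PySem.List.pyIdx?, h1, g2]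
  split <;> rename_i hr <;> simp [List.range_succ, h1, g2, PySem.List.remove?_cons_of_ne, g3] at hr; (subst hr; rfl)

theorem loop3_z (x y z num : Int) (h1 : z < x) (h2 : z < y) :
    adigitsLoop [x, y, z] num = adigitsLoop [x, y] (num * 10 + z) := by
  rw [adigitsLoop]
  have g3 : x ≠ z := ne_of_gt h1
  have g4 : y ≠ z := ne_of_gt h2
  rcases lt_or_ge y x with h | h
  · simp [adigitsFindMin, List.range_succ, PySem.List.pyRange, PySem.List.pyGet?, PySem.List.pyIdx?, h, h2]
    split <;> rename_i hr <;> simp [List.range_succ, h, h2, PySem.List.remove?_cons_of_ne, g3, g4] at hr; (subst hr; rfl)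
  · have g1 : ¬ y < x := not_lt.mpr h
    simp [adigitsFindMin, List.range_succ, PySem.List.pyRange, PySem.List.pyGet?, PySem.List.pyIdx?, g1, h1]
    split <;> rename_i hr <;> simp [List.range_succ, g1, h1, PySem.List.remove?_cons_of_ne, g3, g4] at hr; (subst hr; rfl)

theorem alt_sorted (a b c x y z : Int) (hp : [x, y, z].Perm [a, b, c])
    (h1 : x ≤ y) (h2 : y ≤ z) : adigits_alt a b c = 100 * x + 10 * y + z := by
  unfold adigits_alt
  rw [PySem.List.sorted_id_eq_of_perm_of_pairwise [a, b, c] [x, y, z] hp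
    (by simp; omega)]

theorem adigits_eq (a b c : Int) : adigits a b c = adigits_alt a b c := by
  unfold adigits
  rcases le_or_gt a b with hab | hab <;> rcases le_or_gt b c with hbc | hbc <;>
    rcases le_or_gt a c with hac | hac
  · rw [loop3_x a b c 0 hab hac, loop2_le b c _ hbc, loop1,
      alt_sorted a b c a b c (List.Perm.refl _) hab hbc]; ring
  · omega
  · rw [loop3_x a b c 0 hab hac, loop2_lt b c _ hbc, loop1,
      alt_sorted a b c a c b (List.Perm.cons a (List.Perm.swap b c [])) hac (le_of_lt hbc)]; ring
  · rw [loop3_z a b c 0 hac (by omega), loop2_le a b _ hab, loop1,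
      alt_sorted a b c c a b ((List.Perm.swap a c [b]).trans
        (List.Perm.cons a (List.Perm.swap b c []))) (le_of_lt hac) hab]; ring
  · rw [loop3_y a b c 0 hab hbc, loop2_le a c _ hac, loop1,
      alt_sorted a b c b a c (List.Perm.swap a b [c]) (le_of_lt hab) hac]; ring
  · rw [loop3_y a b c 0 hab hbc, loop2_lt a c _ hac, loop1,
      alt_sorted a b c b c a ((List.Perm.cons b (List.Perm.swap a c [])).trans
        (List.Perm.swap a b [c])) hbc (le_of_lt hac)]; ring
  · omega
  · rw [loop3_z a b c 0 hac hbc, loop2_lt a b _ hab, loop1,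
      alt_sorted a b c c b a ((List.Perm.swap b c [a]).trans
        ((List.Perm.cons b (List.Perm.swap a c [])).trans (List.Perm.swap a b [c])))
        (le_of_lt hbc) (le_of_lt hab)]; ring

-- ===== VERDICT (by name: the statement is the Claim_ definition above) =====
theorem adigits_spec : Claim_equal_adigits := by
  intro a b c _
  exact adigits_eq a b c
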